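-- pv_equiv track=rewrite | github.com/mome44/Tesi_laurea | final_processing.py | process_fulltext
-- ===== SOURCE A (Python) =====
-- def process_fulltext(full_text):
--     lines = full_text.split("\n")
--
--     singe_lines = set()
--
--     full_text_processed =""
--     for line in lines:
--         lunghezza = len(line.strip().split())
--         if lunghezza >= 3 and line not in singe_lines:
--             full_text_processed += "\n" + line
--             singe_lines.add(line)
--     return full_text_processed
-- ===== SOURCE B (Python) =====
-- def process_fulltext(full_text):
--     def rec(lines):
--         if not lines:
--             return ""
--         head, rest = lines[0], lines[1:]
--         if len(head.strip().split()) >= 3: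
--             return "\n" + head + rec([l for l in rest if l != head])
--         return rec(rest)
--     return rec(full_text.split("\n"))
-- ===== Notes on version B (the rewrite author's own statement) =====
-- stated objective: alternative
-- what changed: Replaces A's iterative loop with a mutable accumulator string and seen-set by a recursion on the line list that deduplicates by deleting every later occurrence of the emitted head from the tail, so no seen-set or membership test against accumulated state exists at all.
import Mathlib
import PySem

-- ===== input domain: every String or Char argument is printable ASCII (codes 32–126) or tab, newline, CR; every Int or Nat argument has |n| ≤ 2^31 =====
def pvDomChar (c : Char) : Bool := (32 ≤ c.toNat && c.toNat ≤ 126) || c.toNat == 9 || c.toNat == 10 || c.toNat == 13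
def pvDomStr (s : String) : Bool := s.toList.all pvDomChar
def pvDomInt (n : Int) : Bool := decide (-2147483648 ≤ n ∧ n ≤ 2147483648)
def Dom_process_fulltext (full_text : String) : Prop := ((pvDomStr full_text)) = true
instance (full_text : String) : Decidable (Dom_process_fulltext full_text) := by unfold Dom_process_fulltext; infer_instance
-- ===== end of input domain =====

-- B replaces A's iterative loop (mutable accumulator string + seen-set) by a recursion
-- on the line list that deduplicates by deleting later occurrences of the emitted head
-- from the tail (alternative decomposition, no seen-set state).

-- ===== PORT A =====
-- full_text.split("\n") (sep nonempty), shared verbatim by both Pythons' split call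
def pvLines (full_text : String) : List String :=
  (PySem.Chars.splitOn full_text.toList ['\n']).map String.ofList

-- the loop body of A: filter on word count, skip already-seen lines, append "\n" + line
def pvStepA (st : String × PySem.Set String) (line : String) : String × PySem.Set String :=
  let lunghezza := (PySem.Str.split₀ (PySem.Str.strip line)).length
  if decide (3 ≤ lunghezza) && !(PySem.Set.contains st.2 line) then
    (st.1 ++ "\n" ++ line, PySem.Set.add st.2 line)
  else st

def process_fulltext (full_text : String) : String :=
  let lines := pvLines full_text
  (lines.foldl pvStepA ("", PySem.Set.empty)).1

-- ===== PORT B =====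
-- Source B's recursive helper 'rec': emit the head if it has ≥ 3 words and recurse on the
-- tail with every occurrence of the head removed; otherwise recurse on the tail.
def pvRecB : List String → String
  | [] => ""
  | head :: rest =>
    if decide (3 ≤ (PySem.Str.split₀ (PySem.Str.strip head)).length) then
      "\n" ++ head ++ pvRecB (rest.filter (fun l => decide (l ≠ head)))
    else pvRecB rest
termination_by l => l.length
decreasing_by
  · simp only [List.length_unattach]
    exact Nat.lt_succ_of_le (le_trans (List.length_filter_le _ _) (by simp))
  · exact Nat.lt_succ_self _

def process_fulltext_alt (full_text : String) : String :=
  pvRecB (pvLines full_text)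

-- ===== PRECONDITION & SPEC =====
def Spec_process_fulltext (full_text : String) (out : String) : Prop := out = process_fulltext_alt full_text
instance (full_text : String) (out : String) : Decidable (Spec_process_fulltext full_text out) := by unfold Spec_process_fulltext; infer_instance

-- ===== CLAIM (what is proved, stated in full; the proofs are below) =====
def Claim_equal_process_fulltext : Prop := ∀ (full_text : String), Dom_process_fulltext full_text → Spec_process_fulltext full_text (process_fulltext full_text)

-- ===== LEMMAS AND PROOFS =====

-- the word-count filter both programs apply
def pvKeep (line : String) : Bool :=
  decide (3 ≤ (PySem.Str.split₀ (PySem.Str.strip line)).length)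

theorem pvStepA_eq (s : String) (t : PySem.Set String) (x : String) :
    pvStepA (s, t) x =
      if pvKeep x && !(List.contains t x) then (s ++ "\n" ++ x, PySem.Set.add t x) else (s, t) :=
  rfl

theorem pvRecB_eq (x : String) (xs : List String) :
    pvRecB (x :: xs) =
      if pvKeep x then "\n" ++ x ++ pvRecB (xs.filter (fun l => decide (l ≠ x)))
      else pvRecB xs := by
  rw [pvRecB]; rfl

-- A's fold with accumulator s and seen-set t computes s followed by B's recursion on
-- the lines not yet seen: the seen-set is equivalent to pre-deleting its elements.
theorem pvFoldA_eq_recB (l : List String) : ∀ (t : PySem.Set String) (s : String),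
    (l.foldl pvStepA (s, t)).1 = s ++ pvRecB (l.filter (fun x => !(List.contains t x))) := by
  induction l with
  | nil => intro t s; simp [pvRecB]
  | cons x xs ih =>
    intro t s
    rw [List.foldl_cons, pvStepA_eq]
    cases hct : List.contains t x with
    | true =>
      have hx : x ∈ t := List.mem_of_elem_eq_true hct
      rw [List.filter_cons_of_neg (by simp [hx])]
      simp only [Bool.not_true, Bool.and_false, if_neg Bool.false_ne_true]
      exact ih t s
    | false =>
      have hc : x ∉ t := by simpa using hct
      rw [List.filter_cons_of_pos (by simpa using hc), pvRecB_eq]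
      cases hk : pvKeep x with
      | false =>
        simp only [Bool.false_and, if_neg Bool.false_ne_true]
        exact ih t s
      | true =>
        simp only [Bool.not_false, Bool.and_true]
        rw [if_pos trivial, if_pos trivial, ih (PySem.Set.add t x) (s ++ "\n" ++ x), List.filter_filter]
        have hf : (xs.filter fun y => (decide (y ≠ x)) && !(List.contains t y))
            = xs.filter fun y => !(List.contains (PySem.Set.add t x) y) := by
          apply List.filter_congr
          intro y _
          have hmem := PySem.Set.mem_add t x y
          by_cases hyx : y = x
          · subst hyx; simp [hmem]
          · by_cases hyt : y ∈ t
            · simp [hmem, hyt, hyx]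
            · simp [hmem, hyt, hyx]
        rw [hf]
        simp [String.append_assoc]

-- ===== VERDICT (by name: the statement is the Claim_ definition above) =====
theorem process_fulltext_spec : Claim_equal_process_fulltext := by
  intro full_text _
  show (process_fulltext full_text) = process_fulltext_alt full_text
  unfold process_fulltext process_fulltext_alt
  rw [pvFoldA_eq_recB]
  have : (pvLines full_text).filter (fun x => !(List.contains PySem.Set.empty x))
      = pvLines full_text := by simp [PySem.Set.empty]
  rw [this]
  simp
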